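-- pv_equiv track=rewrite | github.com/Arpan-shrma/Nonogram_maker_and_Solver | makenonogram.py | extract_clues
-- ===== SOURCE A (Python) =====
-- def extract_clues(line):
--     """
--     Extract consecutive filled cell counts in a line (row or column).
--
--     """
--     clues = []
--     count = 0
--     for cell in line:
--         # Count consecutive filled cells
--         if cell == 1:
--             count += 1
--         elif count > 0:
--             clues.append(count)
--             count = 0
--     if count > 0:
--         clues.append(count)
--     return clues if clues else [0]
-- ===== SOURCE B (Python) =====
-- def extract_clues(line):
--     # two-pointer scan: for each maximal run of 1s, record its span length
--     clues = []
--     i = 0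
--     n = len(line)
--     while i < n:
--         if line[i] != 1:
--             i += 1
--         else:
--             j = i + 1
--             while j < n and line[j] == 1:
--                 j += 1
--             clues.append(j - i)
--             i = j
--     return clues if clues else [0]
-- ===== Notes on version B (the rewrite author's own statement) =====
-- stated objective: alternative
-- what changed: Replaces the stateful cell-by-cell counter with boundary-flush logic by a recursive span decomposition that peels one maximal run of 1s (measured by scanning ahead) per step.
import Mathlib
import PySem

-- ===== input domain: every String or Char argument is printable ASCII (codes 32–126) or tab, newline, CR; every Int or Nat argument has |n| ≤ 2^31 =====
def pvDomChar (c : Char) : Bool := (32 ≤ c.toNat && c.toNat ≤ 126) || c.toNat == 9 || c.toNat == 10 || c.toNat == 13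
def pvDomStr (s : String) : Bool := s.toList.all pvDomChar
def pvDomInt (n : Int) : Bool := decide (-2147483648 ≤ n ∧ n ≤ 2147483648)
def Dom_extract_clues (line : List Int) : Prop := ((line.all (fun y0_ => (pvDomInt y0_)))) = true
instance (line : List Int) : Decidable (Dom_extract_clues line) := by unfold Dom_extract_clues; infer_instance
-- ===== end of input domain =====

-- B replaces A's running counter + boundary-flush with an iterative two-pointer span scan (alternative, same cost).


-- ===== PORT A =====
-- the for-loop with its (clues, count) state
def pvLoopA : List Int → List Int → Int → List Int × Int
  | [], clues, count => (clues, count)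
  | cell :: rest, clues, count =>
    if cell = 1 then pvLoopA rest clues (count + 1)
    else if count > 0 then pvLoopA rest (clues ++ [count]) 0
    else pvLoopA rest clues count

def extract_clues (line : List Int) : List Int :=
  let p := pvLoopA line [] 0
  let clues := if p.2 > 0 then p.1 ++ [p.2] else p.1
  if clues = [] then [0] else clues

-- ===== PORT B =====
-- inner while loop: advance j while j < n and line[j] == 1 (indices stay in range, so getD is exact)
def pvRunEnd (line : List Int) (n : Nat) (j : Nat) : Nat :=
  if j < n ∧ line.getD j 0 = 1 then pvRunEnd line n (j + 1) else j
termination_by n - j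

-- the inner loop never moves j backwards (needed for the outer loop's termination)
theorem pvRunEnd_ge (line : List Int) (n : Nat) : ∀ j, j ≤ pvRunEnd line n j := by
  intro j
  induction j using pvRunEnd.induct line n with
  | case1 j h ih => rw [pvRunEnd, if_pos h]; omega
  | case2 j h => rw [pvRunEnd, if_neg h]

-- outer while loop over the index i, with the clues accumulator
def pvLoopB (line : List Int) (n : Nat) (clues : List Int) (i : Nat) : List Int :=
  if _ : i < n then
    if line.getD i 0 ≠ 1 then pvLoopB line n clues (i + 1)
    else
      let j := pvRunEnd line n (i + 1)
      pvLoopB line n (clues ++ [(j : Int) - (i : Int)]) j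
  else clues
termination_by n - i
decreasing_by
  · omega
  · have := pvRunEnd_ge line n (i + 1); omega

def extract_clues_alt (line : List Int) : List Int :=
  let clues := pvLoopB line line.length [] 0
  if clues = [] then [0] else clues

-- ===== PRECONDITION & SPEC =====
def Spec_extract_clues (line : List Int) (out : List Int) : Prop := out = extract_clues_alt line
instance (line : List Int) (out : List Int) : Decidable (Spec_extract_clues line out) := by unfold Spec_extract_clues; infer_instance

-- ===== CLAIM (what is proved, stated in full; the proofs are below) =====
def Claim_equal_extract_clues : Prop := ∀ (line : List Int), Dom_extract_clues line → Spec_extract_clues line (extract_clues line)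

-- ===== LEMMAS AND PROOFS =====

-- the run list, written structurally over the list (bridge between the two loops)
def pvRuns : List Int → List Int
  | [] => []
  | c :: rest =>
    if c ≠ 1 then pvRuns rest
    else ((1 : Int) + (rest.takeWhile (fun x => x == 1)).length) ::
         pvRuns (rest.dropWhile (fun x => x == 1))
termination_by l => l.length
decreasing_by
  all_goals simp only [List.length_cons]
  · omega
  · have := List.length_dropWhile_le (p := fun x => x == (1 : Int)) (l := rest)
    omega

-- dropWhile drops exactly the takeWhile prefix (used to align the index loop with pvRuns)
theorem pvDropWhile_eq_drop (l : List Int) :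
    l.dropWhile (fun x => x == (1 : Int)) = l.drop (l.takeWhile (fun x => x == (1 : Int))).length := by
  induction l with
  | nil => simp
  | cons c r ih => by_cases h : c == (1 : Int) <;> simp [h, ih]

-- A's loop, restated without the accumulator: the pending count carried through the cells
def pvRunsWith : List Int → Int → List Int
  | [], count => if count > 0 then [count] else []
  | c :: rest, count =>
    if c = 1 then pvRunsWith rest (count + 1)
    else if count > 0 then count :: pvRunsWith rest 0
    else pvRunsWith rest count

theorem pvLoopA_runsWith (l : List Int) : ∀ (clues : List Int) (count : Int),
    (let p := pvLoopA l clues count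
     if p.2 > 0 then p.1 ++ [p.2] else p.1) = clues ++ pvRunsWith l count := by
  induction l with
  | nil => intro clues count; by_cases h : count > 0 <;> simp [pvLoopA, pvRunsWith, h]
  | cons c rest ih =>
    intro clues count
    by_cases hc : c = 1
    · simpa [pvLoopA, pvRunsWith, hc] using ih clues (count + 1)
    · by_cases hp : count > 0
      · simpa [pvLoopA, pvRunsWith, hc, hp] using ih (clues ++ [count]) 0
      · simpa [pvLoopA, pvRunsWith, hc, hp] using ih clues count

theorem pvRunsWith_eq (l : List Int) :
    (∀ count : Int, 0 < count →
      pvRunsWith l count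
        = (count + (l.takeWhile (fun x => x == 1)).length) ::
          pvRuns (l.dropWhile (fun x => x == 1)))
    ∧ pvRunsWith l 0 = pvRuns l := by
  induction l with
  | nil => exact ⟨fun count h => by simp [pvRunsWith, pvRuns, h], by simp [pvRunsWith, pvRuns]⟩
  | cons c rest ih =>
    by_cases hc : c = 1
    · constructor
      · intro count h
        have := (ih.1 (count + 1) (by omega))
        simp [pvRunsWith, hc, this, List.takeWhile, List.dropWhile]
        ring
      · have := ih.1 1 (by omega)
        simp [pvRunsWith, pvRuns, hc, this]
    · constructor
      · intro count h
        have hb : ((fun x => x == (1 : Int)) c) = false := by simp [hc]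
        simp [pvRunsWith, pvRuns, hc, h, hb, ih.2]
      · simp [pvRunsWith, pvRuns, hc, ih.2]

-- closed form of the inner while loop: it skips exactly the leading 1s from position j
theorem pvRunEnd_eq (l : List Int) : ∀ j,
    pvRunEnd l l.length j = j + ((l.drop j).takeWhile (fun x => x == 1)).length := by
  intro j
  induction j using pvRunEnd.induct l l.length with
  | case1 j h ih =>
    obtain ⟨hj, hv⟩ := h
    rw [pvRunEnd, if_pos ⟨hj, hv⟩, ih]
    rw [List.drop_eq_getElem_cons hj]
    have : l[j] = 1 := by rwa [List.getD_eq_getElem l 0 hj] at hv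
    simp [this]
    omega
  | case2 j h =>
    rw [pvRunEnd, if_neg h]
    by_cases hj : j < l.length
    · have hv : ¬ l.getD j 0 = 1 := by tauto
      rw [List.drop_eq_getElem_cons hj]
      have : ¬ l[j] = 1 := by rwa [List.getD_eq_getElem l 0 hj] at hv
      simp [this]
    · rw [List.drop_eq_nil_of_le (by omega)]; simp

-- the outer loop computes clues ++ the structural run list of the remaining suffix
theorem pvLoopB_eq (l : List Int) : ∀ i clues,
    pvLoopB l l.length clues i = clues ++ pvRuns (l.drop i) := by
  have main : ∀ k i clues, l.length - i ≤ k →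
      pvLoopB l l.length clues i = clues ++ pvRuns (l.drop i) := by
    intro k
    induction k with
    | zero =>
      intro i clues hk
      rw [pvLoopB, dif_neg (by omega), List.drop_eq_nil_of_le (by omega)]
      simp [pvRuns]
    | succ k ih =>
      intro i clues hk
      by_cases hi : i < l.length
      · have hdrop := List.drop_eq_getElem_cons hi
        by_cases hv : l.getD i 0 = 1
        · have hgv : l[i] = 1 := by rwa [List.getD_eq_getElem l 0 hi] at hv
          rw [pvLoopB, dif_pos hi, if_neg (by simpa using hv)]
          have hend := pvRunEnd_eq l (i + 1)
          set t := ((l.drop (i + 1)).takeWhile (fun x => x == 1)).length with ht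
          have ht_le : t ≤ l.length - (i + 1) := by
            have h1 := (List.takeWhile_sublist (l := l.drop (i + 1))
              (p := fun x => x == (1 : Int))).length_le
            simp only [List.length_drop] at h1
            omega
          rw [ih _ _ (by omega)]
          have hdw : (l.drop (i + 1)).dropWhile (fun x => x == 1) = l.drop (i + 1 + t) := by
            rw [pvDropWhile_eq_drop, List.drop_drop, ← ht]
          have hrun : pvRuns (l[i] :: l.drop (i + 1))
              = ((1 : Int) + t) :: pvRuns (l.drop (i + 1 + t)) := by
            rw [pvRuns, if_neg (by simp [hgv]), hdw, ← ht]
          rw [hdrop, hrun, hend]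
          simp only [List.append_assoc, List.cons_append]
          congr 2
          push_cast
          ring
        · have hgv : ¬ l[i] = 1 := by rwa [List.getD_eq_getElem l 0 hi] at hv
          rw [pvLoopB, dif_pos hi, if_pos (by simpa using hv), ih _ _ (by omega), hdrop,
            pvRuns, if_pos (by simpa using hgv)]
      · rw [pvLoopB, dif_neg hi, List.drop_eq_nil_of_le (by omega)]
        simp [pvRuns]
  intro i clues
  exact main (l.length - i) i clues le_rfl

-- ===== VERDICT (by name: the statement is the Claim_ definition above) =====
theorem extract_clues_spec : Claim_equal_extract_clues := by
  intro l _
  unfold Spec_extract_clues extract_clues extract_clues_alt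
  have hA := pvLoopA_runsWith l [] 0
  simp only [List.nil_append] at hA
  have hB := pvLoopB_eq l 0 []
  simp only [List.drop_zero, List.nil_append] at hB
  simp [hA, hB, (pvRunsWith_eq l).2]
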